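-- pv_equiv track=rewrite | github.com/ChunTaoPengim/NTU-IRTM | hw4/pa4.py | max_pair
-- ===== SOURCE A (Python) =====
-- def max_pair(C, I, size):
--     max = -1
--     doc_i, doc_m = -1, -1
--     for i in range(size):
--         if I[i] != 1:
--             continue
--         for m in range(i+1, size):
--             if I[m] == 1 and i != m:
--                 if max < C[i][m]:
--                     max = C[i][m]
--                     doc_i, doc_m = i, m
--     return doc_i, doc_m
-- ===== SOURCE B (Python) =====
-- def max_pair(C, I, size):
--     # build a per-row candidate table, then select the best row in a second pass
--     rows = []
--     for i in range(size):
--         if I[i] != 1: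
--             continue
--         best = None  # (m, value): first m attaining the row maximum over active m
--         for m in range(i + 1, size):
--             if I[m] == 1 and (best is None or C[i][m] > best[1]):
--                 best = (m, C[i][m])
--         if best is not None and best[1] > -1:
--             rows.append((i, best[0], best[1]))
--     cur, doc_i, doc_m = -1, -1, -1
--     for i, m, v in rows:
--         if cur < v:
--             cur, doc_i, doc_m = v, i, m
--     return doc_i, doc_m
-- ===== Notes on version B (the rewrite author's own statement) =====
-- stated objective: alternative
-- what changed: Replaced A's single nested running-max scan with mutable global state by a two-phase decomposition: first build a table of per-row candidates (first argmax over active m in each active row, kept only if its value exceeds -1), then a second pass selects the first row whose candidate strictly beats the running best.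
import Mathlib
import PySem

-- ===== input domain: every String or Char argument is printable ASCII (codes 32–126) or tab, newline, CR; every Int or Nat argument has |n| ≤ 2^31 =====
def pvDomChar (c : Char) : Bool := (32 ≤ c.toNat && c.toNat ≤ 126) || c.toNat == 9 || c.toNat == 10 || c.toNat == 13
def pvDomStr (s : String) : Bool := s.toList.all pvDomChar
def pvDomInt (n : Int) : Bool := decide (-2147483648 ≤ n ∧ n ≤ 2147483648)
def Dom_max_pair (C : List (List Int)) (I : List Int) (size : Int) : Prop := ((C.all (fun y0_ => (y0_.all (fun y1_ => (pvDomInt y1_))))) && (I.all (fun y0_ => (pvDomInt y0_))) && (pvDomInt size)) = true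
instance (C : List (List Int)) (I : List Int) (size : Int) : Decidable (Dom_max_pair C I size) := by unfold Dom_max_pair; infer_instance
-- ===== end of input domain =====

-- B replaces A's single nested running-max scan by a build-table-then-select decomposition
-- (per-row first-argmax candidates, then a second pass picking the first strictly-better row);
-- same O(n^2) cost, objective: alternative.

-- ===== PORT A =====
-- I[i] (exact under Pre_, which puts every accessed index in range)
def pvGetI (I : List Int) (i : Int) : Int := PySem.List.pyGetD I i 0
-- C[i][m] (exact under Pre_, which puts every accessed index in range)
def pvGetC (C : List (List Int)) (i m : Int) : Int :=
  PySem.List.pyGetD (PySem.List.pyGetD C i []) m 0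

def max_pair (C : List (List Int)) (I : List Int) (size : Int) : Int × Int :=
  let st := (PySem.List.pyRange 0 size 1).foldl (fun s i =>
    if pvGetI I i ≠ 1 then s
    else (PySem.List.pyRange (i+1) size 1).foldl (fun t m =>
      if pvGetI I m = 1 ∧ i ≠ m then
        (if t.1 < pvGetC C i m then (pvGetC C i m, i, m) else t)
      else t) s) ((-1 : Int), (-1 : Int), (-1 : Int))
  (st.2.1, st.2.2)

-- ===== PORT B =====
-- one step of the row scan: keep the first m attaining the row maximum over active m
def rowBestStep (C : List (List Int)) (I : List Int) (i : Int)
    (b : Option (Int × Int)) (m : Int) : Option (Int × Int) :=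
  match b with
  | none => if pvGetI I m = 1 then some (m, pvGetC C i m) else none
  | some p => if pvGetI I m = 1 ∧ pvGetC C i m > p.2 then some (m, pvGetC C i m) else some p

def rowBest (C : List (List Int)) (I : List Int) (i : Int) (ms : List Int) :
    Option (Int × Int) :=
  ms.foldl (rowBestStep C I i) none

def rowsStep (C : List (List Int)) (I : List Int) (size : Int)
    (acc : List (Int × Int × Int)) (i : Int) : List (Int × Int × Int) :=
  if pvGetI I i ≠ 1 then acc
  else match rowBest C I i (PySem.List.pyRange (i+1) size 1) with
    | some (m, v) => if v > -1 then acc ++ [(i, m, v)] else acc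
    | none => acc

def selectStep (s : Int × Int × Int) (p : Int × Int × Int) : Int × Int × Int :=
  if s.1 < p.2.2 then (p.2.2, p.1, p.2.1) else s

def max_pair_alt (C : List (List Int)) (I : List Int) (size : Int) : Int × Int :=
  let rows := (PySem.List.pyRange 0 size 1).foldl (rowsStep C I size) []
  let st := rows.foldl selectStep ((-1 : Int), (-1 : Int), (-1 : Int))
  (st.2.1, st.2.2)

-- ===== PRECONDITION & SPEC =====
-- Pre_ excludes exactly the inputs where Python A raises IndexError: size must not exceed
-- len(I), and C[i][m] must exist for every active pair i < m < size actually accessed.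
def Pre_max_pair (C : List (List Int)) (I : List Int) (size : Int) : Prop :=
  size ≤ (I.length : Int) ∧
  ∀ i ∈ List.range size.toNat, ∀ m ∈ List.range size.toNat, i < m →
    I.getD i 0 = 1 → I.getD m 0 = 1 → i < C.length ∧ m < (C.getD i []).length
instance (C : List (List Int)) (I : List Int) (size : Int) : Decidable (Pre_max_pair C I size) := by
  unfold Pre_max_pair; infer_instance

def pvWitness_max_pair : List (List Int) × List Int × Int :=
  ([[0, 5, 2], [1, 0, 3], [4, 7, 0]], [1, 1, 1], 3)

def Spec_max_pair (C : List (List Int)) (I : List Int) (size : Int) (out : Int × Int) : Prop := out = max_pair_alt C I size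
instance (C : List (List Int)) (I : List Int) (size : Int) (out : Int × Int) : Decidable (Spec_max_pair C I size out) := by unfold Spec_max_pair; infer_instance

-- ===== CLAIM (what is proved, stated in full; the proofs are below) =====
def Claim_equal_max_pair : Prop := ∀ (C : List (List Int)) (I : List Int) (size : Int), Dom_max_pair C I size → Pre_max_pair C I size → Spec_max_pair C I size (max_pair C I size)

-- ===== LEMMAS AND PROOFS =====

-- A's inner-loop body and outer-loop body, named for the proofs
def innerStepA (C : List (List Int)) (I : List Int) (i : Int)
    (t : Int × Int × Int) (m : Int) : Int × Int × Int :=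
  if pvGetI I m = 1 ∧ i ≠ m then
    (if t.1 < pvGetC C i m then (pvGetC C i m, i, m) else t)
  else t

def outerStepA (C : List (List Int)) (I : List Int) (size : Int)
    (s : Int × Int × Int) (i : Int) : Int × Int × Int :=
  if pvGetI I i ≠ 1 then s
  else (PySem.List.pyRange (i+1) size 1).foldl (innerStepA C I i) s

-- interpretation of a row candidate against a running state
def applyBest (i : Int) (b : Option (Int × Int)) (s : Int × Int × Int) : Int × Int × Int :=
  match b with
  | none => s
  | some (m, v) => if s.1 < v then (v, i, m) else s

theorem inner_eq_rowBest (C : List (List Int)) (I : List Int) (i : Int) :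
    ∀ (ms : List Int) (b : Option (Int × Int)) (s : Int × Int × Int),
      (∀ m ∈ ms, i ≠ m) →
      ms.foldl (innerStepA C I i) (applyBest i b s)
        = applyBest i (ms.foldl (rowBestStep C I i) b) s := by
  intro ms
  induction ms with
  | nil => intro b s _; rfl
  | cons m ms ih =>
    intro b s hne
    have hi : i ≠ m := hne m (by simp)
    have key : innerStepA C I i (applyBest i b s) m
        = applyBest i (rowBestStep C I i b m) s := by
      cases b with
      | none =>
        by_cases hA : pvGetI I m = 1
        · simp [innerStepA, rowBestStep, applyBest, hA, hi]
        · simp [innerStepA, rowBestStep, applyBest, hA]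
      | some p =>
        obtain ⟨mb, vb⟩ := p
        by_cases hA : pvGetI I m = 1
        · by_cases hv : pvGetC C i m > vb
          · by_cases hs1 : s.1 < vb
            · have h3 : s.1 < pvGetC C i m := by omega
              simp [innerStepA, rowBestStep, applyBest, hA, hi, hs1, hv, h3]
            · simp [innerStepA, rowBestStep, applyBest, hA, hi, hs1, hv]
          · by_cases hs1 : s.1 < vb
            · have h3 : ¬ vb < pvGetC C i m := by omega
              simp [innerStepA, rowBestStep, applyBest, hA, hi, hs1, hv]
            · have h3 : ¬ s.1 < pvGetC C i m := by omega
              simp [innerStepA, rowBestStep, applyBest, hA, hi, hs1, hv, h3]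
        · simp [innerStepA, rowBestStep, applyBest, hA]
    simp only [List.foldl_cons, key]
    exact ih _ s (fun x hx => hne x (by simp [hx]))

theorem innerStepA_mono (C : List (List Int)) (I : List Int) (i : Int)
    (t : Int × Int × Int) (m : Int) : t.1 ≤ (innerStepA C I i t m).1 := by
  simp only [innerStepA]; split_ifs <;> simp <;> omega

theorem inner_fold_mono (C : List (List Int)) (I : List Int) (i : Int) :
    ∀ (ms : List Int) (t : Int × Int × Int),
      t.1 ≤ (ms.foldl (innerStepA C I i) t).1 := by
  intro ms
  induction ms with
  | nil => intro t; exact le_refl _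
  | cons m ms ih =>
    intro t
    exact le_trans (innerStepA_mono C I i t m) (ih _)

theorem outerStepA_mono (C : List (List Int)) (I : List Int) (size : Int)
    (s : Int × Int × Int) (i : Int) : s.1 ≤ (outerStepA C I size s i).1 := by
  simp only [outerStepA]
  split_ifs with h
  · exact le_refl _
  · exact inner_fold_mono C I i _ s

-- A's body on row i equals folding the selection step over that row's table entry
theorem body_eq_entry (C : List (List Int)) (I : List Int) (size : Int)
    (i : Int) (s : Int × Int × Int) (hs : -1 ≤ s.1) :
    outerStepA C I size s i = (rowsStep C I size [] i).foldl selectStep s := by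
  simp only [outerStepA, rowsStep]
  split_ifs with h
  · rfl
  · have hne : ∀ m ∈ PySem.List.pyRange (i+1) size 1, i ≠ m := by
      intro m hm
      have := (PySem.List.mem_pyRange_one.mp hm).1
      omega
    have heq := inner_eq_rowBest C I i (PySem.List.pyRange (i+1) size 1) none s hne
    simp only [applyBest] at heq
    rw [heq, show (PySem.List.pyRange (i+1) size 1).foldl (rowBestStep C I i) none
        = rowBest C I i (PySem.List.pyRange (i+1) size 1) from rfl]
    cases hb : rowBest C I i (PySem.List.pyRange (i+1) size 1) with
    | none => rfl
    | some p =>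
      obtain ⟨m, v⟩ := p
      by_cases hv : v > -1
      · simp [hv, selectStep]
      · have h3 : ¬ s.1 < v := by omega
        simp [hv, h3]

-- building the table from any accumulator only appends to it
theorem rows_from_acc (C : List (List Int)) (I : List Int) (size : Int) :
    ∀ (is : List Int) (acc : List (Int × Int × Int)),
      is.foldl (rowsStep C I size) acc = acc ++ is.foldl (rowsStep C I size) [] := by
  intro is
  induction is with
  | nil => intro acc; simp
  | cons i is ih =>
    intro acc
    have step : ∀ a : List (Int × Int × Int),
        rowsStep C I size a i = a ++ rowsStep C I size [] i := by
      intro a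
      simp only [rowsStep]
      split_ifs with h
      · simp
      · cases hb : rowBest C I i (PySem.List.pyRange (i+1) size 1) with
        | none => simp
        | some p =>
          obtain ⟨m, v⟩ := p
          by_cases hv : v > -1
          · simp [hv]
          · simp [hv]
    simp only [List.foldl_cons]
    rw [ih (rowsStep C I size acc i), ih (rowsStep C I size [] i), step acc]
    simp

theorem main_eq (C : List (List Int)) (I : List Int) (size : Int) :
    ∀ (is : List Int) (s : Int × Int × Int), -1 ≤ s.1 →
      is.foldl (outerStepA C I size) s
        = (is.foldl (rowsStep C I size) []).foldl selectStep s := by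
  intro is
  induction is with
  | nil => intro s _; rfl
  | cons i is ih =>
    intro s hs
    simp only [List.foldl_cons]
    rw [rows_from_acc C I size is (rowsStep C I size [] i), List.foldl_append,
      ← body_eq_entry C I size i s hs]
    exact ih _ (le_trans hs (outerStepA_mono C I size s i))

-- ===== VERDICT (by name: the statement is the Claim_ definition above) =====
theorem max_pair_spec : Claim_equal_max_pair := by
  intro C I size _ _
  unfold Spec_max_pair max_pair max_pair_alt
  rw [show (fun s i =>
      if pvGetI I i ≠ 1 then s
      else (PySem.List.pyRange (i+1) size 1).foldl (fun t m =>
        if pvGetI I m = 1 ∧ i ≠ m then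
          (if t.1 < pvGetC C i m then (pvGetC C i m, i, m) else t)
        else t) s) = outerStepA C I size from rfl]
  rw [main_eq C I size (PySem.List.pyRange 0 size 1) ((-1 : Int), (-1 : Int), (-1 : Int)) (by norm_num)]
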